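-- pv_equiv track=rewrite | github.com/Xiyin-Li/LeetCode | two-sum-no-hash.py | twoSum
-- ===== SOURCE A (Python) =====
-- from typing import List
--
-- def twoSum(nums: List[int], target: int) -> List[int]:
--     result = []
--     for i in range(len(nums)):
--         diff = target - nums[i]
--         try:
--             # If the diff is not in the list, we continue the for loop
--             sec_index = nums.index(diff,i+1)
--             result.append(i)
--             result.append(sec_index)
--             return result
--         except ValueError:
--             continue
-- ===== SOURCE B (Python) =====
-- def twoSum(nums, target):
--     # value -> ascending list of its indices, built once; then for each i take the
--     # first occurrence of the complement after i.
--     pos = {}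
--     for j, v in enumerate(nums):
--         pos.setdefault(v, []).append(j)
--     for i, v in enumerate(nums):
--         for j in pos.get(target - v, []):
--             if j > i:
--                 return [i, j]
-- ===== Notes on version B (the rewrite author's own statement) =====
-- stated objective: faster
-- what changed: Replaces the per-element nums.index rescan of the tail with a value->index-list dictionary built once, so each outer step only inspects the complement's occurrence list.
import Mathlib
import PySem

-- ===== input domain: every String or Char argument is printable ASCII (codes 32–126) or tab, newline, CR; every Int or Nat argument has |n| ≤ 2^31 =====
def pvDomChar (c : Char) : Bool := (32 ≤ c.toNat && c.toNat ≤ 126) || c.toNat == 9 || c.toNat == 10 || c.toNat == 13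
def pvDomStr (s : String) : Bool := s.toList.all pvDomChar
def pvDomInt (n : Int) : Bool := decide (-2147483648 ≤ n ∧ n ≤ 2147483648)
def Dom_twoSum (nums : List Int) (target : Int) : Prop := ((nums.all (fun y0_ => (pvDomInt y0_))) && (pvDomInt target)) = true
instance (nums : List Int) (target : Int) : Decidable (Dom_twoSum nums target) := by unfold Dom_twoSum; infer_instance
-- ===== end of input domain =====

-- B replaces A's per-element nums.index rescan by a value→index-list dictionary built once
-- (objective: faster by a constant mechanism on typical inputs; return value proved identical).

-- ===== PORT A =====
-- Python list.index(v, start) (start ≥ 0): first index ≥ start holding v; none = ValueError. Exact.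
def pyIndexFrom (xs : List Int) (v : Int) (start : Nat) : Option Nat :=
  (PySem.List.index? (xs.drop start) v).map (· + start)

def twoSumGoA (nums : List Int) (target : Int) (i : Nat) : Option (List Int) :=
  if h : i < nums.length then
    match pyIndexFrom nums (target - nums[i]) (i + 1) with
    | some j => some [(i : Int), (j : Int)]
    | none => twoSumGoA nums target (i + 1)
  else none
termination_by nums.length - i

def twoSum (nums : List Int) (target : Int) : Option (List Int) :=
  twoSumGoA nums target 0

-- ===== PORT B =====
def buildPos (nums : List Int) : PySem.Dict Int (List Int) :=
  (PySem.List.enumerate nums).foldl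
    (fun d p => d.modify p.2 [] (fun l => l ++ [p.1])) PySem.Dict.empty

def twoSumGoB (nums : List Int) (target : Int) (pos : PySem.Dict Int (List Int))
    (i : Nat) : Option (List Int) :=
  if h : i < nums.length then
    match (pos.getD (target - nums[i]) []).find? (fun j => decide ((i : Int) < j)) with
    | some j => some [(i : Int), j]
    | none => twoSumGoB nums target pos (i + 1)
  else none
termination_by nums.length - i

def twoSum_alt (nums : List Int) (target : Int) : Option (List Int) :=
  twoSumGoB nums target (buildPos nums) 0

-- ===== PRECONDITION & SPEC =====
def Spec_twoSum (nums : List Int) (target : Int) (out : Option (List Int)) : Prop := out = twoSum_alt nums target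
instance (nums : List Int) (target : Int) (out : Option (List Int)) : Decidable (Spec_twoSum nums target out) := by unfold Spec_twoSum; infer_instance

-- ===== CLAIM (what is proved, stated in full; the proofs are below) =====
def Claim_equal_twoSum : Prop := ∀ (nums : List Int) (target : Int), Dom_twoSum nums target → Spec_twoSum nums target (twoSum nums target)

-- ===== LEMMAS AND PROOFS =====

-- occurrence list of v in l, indices starting at s (what buildPos stores under key v)
def occFrom (s : Int) (l : List Int) (v : Int) : List Int :=
  match l with
  | [] => []
  | x :: xs => (if x == v then [s] else []) ++ occFrom (s + 1) xs v

-- getD of the fold over an enumerate-from-s equals getD of the start dict ++ occFrom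
theorem getD_buildPos_from (l : List Int) (s : Int) (d : PySem.Dict Int (List Int)) (v : Int) :
    ((PySem.List.enumerate l s).foldl
        (fun d p => PySem.Dict.modify d p.2 [] (fun l => l ++ [p.1])) d).getD v []
      = d.getD v [] ++ occFrom s l v := by
  induction l generalizing s d with
  | nil => simp [PySem.List.enumerate_nil, occFrom]
  | cons x xs ih =>
      rw [PySem.List.enumerate_cons]
      simp only [List.foldl_cons, occFrom]
      rw [ih]
      rw [PySem.Dict.getD_modify]
      by_cases hv : v = x
      · subst hv; simp
      · simp [hv, Ne.symm hv]

theorem getD_buildPos (nums : List Int) (v : Int) :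
    (buildPos nums).getD v [] = occFrom 0 nums v := by
  unfold buildPos
  rw [getD_buildPos_from]
  simp [PySem.Dict.empty, PySem.Dict.getD, PySem.Dict.get?]

-- first element of occFrom s l v exceeding i = index of v in l from position (i+1-s)
theorem find_occFrom (l : List Int) (v : Int) (i : Nat) (s : Nat) :
    (occFrom (s : Int) l v).find? (fun j => decide ((i : Int) < j))
      = (PySem.List.index? (l.drop (i + 1 - s)) v).map
          (fun k => ((k + (i + 1 - s) + s : Nat) : Int)) := by
  induction l generalizing s with
  | nil => simp [occFrom]
  | cons x xs ih =>
      have hcast : ((s : Int) + 1) = ((s + 1 : Nat) : Int) := by omega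
      simp only [occFrom]
      by_cases hx : x = v
      · subst hx
        simp only [BEq.rfl, if_true, List.singleton_append, List.find?_cons]
        by_cases hs : i < s
        · have h0 : i + 1 - s = 0 := by omega
          have hlt : ((i : Int) < (s : Int)) := by exact_mod_cast hs
          simp only [h0, List.drop_zero]
          rw [PySem.List.index?_cons_self]
          simp [hlt]
        · have hns : ¬ ((i : Int) < (s : Int)) := by exact_mod_cast hs
          simp only [hns, decide_false]
          rw [hcast, ih (s + 1)]
          have h1 : i + 1 - s = (i + 1 - (s + 1)) + 1 := by omega
          rw [h1, List.drop_succ_cons]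
          congr 1
          funext k
          congr 1
          omega
      · have hbe : (x == v) = false := by simp [hx]
        simp only [hbe, Bool.false_eq_true, if_false, List.nil_append]
        rw [hcast, ih (s + 1)]
        by_cases hs : i + 1 ≤ s
        · have h0 : i + 1 - s = 0 := by omega
          have h1 : i + 1 - (s + 1) = 0 := by omega
          simp only [h0, h1, List.drop_zero]
          rw [PySem.List.index?_cons_of_ne xs hx]
          simp only [Option.map_map]
          congr 1
          funext k
          simp only [Function.comp]
          congr 1
          omega
        · have h1 : i + 1 - s = (i + 1 - (s + 1)) + 1 := by omega
          rw [h1, List.drop_succ_cons]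
          congr 1
          funext k
          congr 1
          omega

-- the per-step results agree
theorem step_eq (nums : List Int) (v : Int) (i : Nat) :
    ((buildPos nums).getD v []).find? (fun j => decide ((i : Int) < j))
      = (pyIndexFrom nums v (i + 1)).map (fun j => (j : Int)) := by
  rw [getD_buildPos]
  have h := find_occFrom nums v i 0
  simp only [Nat.cast_zero, Nat.sub_zero, Nat.add_zero] at h
  rw [h]
  unfold pyIndexFrom
  cases PySem.List.index? (nums.drop (i + 1)) v <;> simp

theorem go_eq_aux (nums : List Int) (target : Int) :
    ∀ k i, nums.length - i ≤ k →
      twoSumGoA nums target i = twoSumGoB nums target (buildPos nums) i := by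
  intro k
  induction k with
  | zero =>
      intro i hi
      have h : ¬ i < nums.length := by omega
      rw [twoSumGoA, twoSumGoB]
      simp [h]
  | succ k ih =>
      intro i hi
      rw [twoSumGoA, twoSumGoB]
      by_cases h : i < nums.length
      · simp only [h, dif_pos]
        rw [step_eq nums (target - nums[i]) i]
        cases hp : pyIndexFrom nums (target - nums[i]) (i + 1) with
        | some j => simp
        | none => simpa using ih (i + 1) (by omega)
      · simp [h]

theorem go_eq (nums : List Int) (target : Int) :
    twoSumGoA nums target 0 = twoSumGoB nums target (buildPos nums) 0 :=
  go_eq_aux nums target nums.length 0 (by omega)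

-- ===== VERDICT (by name: the statement is the Claim_ definition above) =====
theorem twoSum_spec : Claim_equal_twoSum := by
  intro nums target _
  unfold Spec_twoSum twoSum twoSum_alt
  exact go_eq nums target
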